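-- pv_equiv track=rewrite | github.com/lim8less/SATS-master | finalSimulation.py | generate_phase_states
-- ===== SOURCE A (Python) =====
-- def generate_phase_states(num_phases):
--     phases = []
--     for i in range(num_phases):
--         if i % 3 == 0:
--             phases.append("GGgrrrGGgrrr")
--         elif i % 3 == 1:
--             phases.append("yyyrrryyyrrr")
--         else:
--             phases.append("rrrGGgrrrGGg")
--     return phases
-- ===== SOURCE B (Python) =====
-- def generate_phase_states(num_phases):
--     base = ["GGgrrrGGgrrr", "yyyrrryyyrrr", "rrrGGgrrrGGg"]
--     return (base * (num_phases // 3 + 1))[:num_phases]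
-- ===== Notes on version B (the rewrite author's own statement) =====
-- stated objective: simpler
-- what changed: Replaces the index loop with its per-element modular branching by replicating the base cycle of phase strings enough times and truncating with a slice.
import Mathlib
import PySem

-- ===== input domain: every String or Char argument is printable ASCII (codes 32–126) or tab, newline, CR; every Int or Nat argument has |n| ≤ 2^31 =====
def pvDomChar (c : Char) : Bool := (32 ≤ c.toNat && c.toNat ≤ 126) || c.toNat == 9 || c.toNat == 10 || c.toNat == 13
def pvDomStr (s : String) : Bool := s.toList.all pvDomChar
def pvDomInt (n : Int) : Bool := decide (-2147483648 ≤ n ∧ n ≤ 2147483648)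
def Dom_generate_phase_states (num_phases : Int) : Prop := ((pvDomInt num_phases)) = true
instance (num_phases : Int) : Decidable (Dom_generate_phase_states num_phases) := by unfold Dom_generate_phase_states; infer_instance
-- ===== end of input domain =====

-- B replaces the per-index modular branch by replicating the 3-string base cycle and truncating (simpler decomposition, same cost).

-- ===== PORT A =====
def generate_phase_states (num_phases : Int) : List String :=
  (PySem.List.pyRange 0 num_phases 1).foldl
    (fun phases i =>
      if PySem.Int.mod i 3 = 0 then phases ++ ["GGgrrrGGgrrr"]
      else if PySem.Int.mod i 3 = 1 then phases ++ ["yyyrrryyyrrr"]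
      else phases ++ ["rrrGGgrrrGGg"])
    []

-- ===== PORT B =====
-- Python 'base * k' for an int k: k ≤ 0 gives []; exact as flatten of (k.toNat) replicas.
def generate_phase_states_alt (num_phases : Int) : List String :=
  let base : List String := ["GGgrrrGGgrrr", "yyyrrryyyrrr", "rrrGGgrrrGGg"]
  PySem.List.slice ((List.replicate (PySem.Int.floordiv num_phases 3 + 1).toNat base).flatten)
    none (some num_phases)

-- ===== PRECONDITION & SPEC =====
def Spec_generate_phase_states (num_phases : Int) (out : List String) : Prop := out = generate_phase_states_alt num_phases
instance (num_phases : Int) (out : List String) : Decidable (Spec_generate_phase_states num_phases out) := by unfold Spec_generate_phase_states; infer_instance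

-- ===== CLAIM (what is proved, stated in full; the proofs are below) =====
def Claim_equal_generate_phase_states : Prop := ∀ (num_phases : Int), Dom_generate_phase_states num_phases → Spec_generate_phase_states num_phases (generate_phase_states num_phases)

-- ===== LEMMAS AND PROOFS =====

def pvStepN (k : Nat) : String :=
  if k % 3 = 0 then "GGgrrrGGgrrr" else if k % 3 = 1 then "yyyrrryyyrrr" else "rrrGGgrrrGGg"

theorem pv_foldl_append_map {α β : Type} (g : α → β) (l : List α) (acc : List β) :
    l.foldl (fun a i => a ++ [g i]) acc = acc ++ l.map g := by
  induction l generalizing acc with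
  | nil => simp
  | cons x xs ih => simp [List.foldl, ih]

def pvStepI (i : Int) : String :=
  if PySem.Int.mod i 3 = 0 then "GGgrrrGGgrrr"
  else if PySem.Int.mod i 3 = 1 then "yyyrrryyyrrr"
  else "rrrGGgrrrGGg"

theorem pv_A_eq_map (n : Int) :
    generate_phase_states n = (List.range n.toNat).map pvStepN := by
  unfold generate_phase_states
  have h : (PySem.List.pyRange 0 n 1).foldl
      (fun phases i =>
        if PySem.Int.mod i 3 = 0 then phases ++ ["GGgrrrGGgrrr"]
        else if PySem.Int.mod i 3 = 1 then phases ++ ["yyyrrryyyrrr"]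
        else phases ++ ["rrrGGgrrrGGg"]) []
      = (PySem.List.pyRange 0 n 1).foldl
      (fun phases i => phases ++ [pvStepI i]) [] := by
    congr 1
    funext phases i
    unfold pvStepI
    split_ifs <;> rfl
  rw [h, pv_foldl_append_map, PySem.List.pyRange_one, List.map_map]
  simp only [List.nil_append, Int.sub_zero]
  apply List.map_congr_left
  intro k _
  simp only [Function.comp, Int.zero_add]
  have hm : PySem.Int.mod (k : Int) 3 = ((k % 3 : Nat) : Int) := by
    exact_mod_cast PySem.Int.mod_natCast k 3
  unfold pvStepI pvStepN
  rw [hm]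
  by_cases h0 : k % 3 = 0
  · rw [if_pos (by exact_mod_cast h0), if_pos h0]
  · rw [if_neg (by exact_mod_cast h0), if_neg h0]
    by_cases h1 : k % 3 = 1
    · rw [if_pos (by exact_mod_cast h1), if_pos h1]
    · rw [if_neg (by exact_mod_cast h1), if_neg h1]

theorem pv_flatten_replicate (r : Nat) :
    (List.replicate r ["GGgrrrGGgrrr", "yyyrrryyyrrr", "rrrGGgrrrGGg"]).flatten
      = (List.range (3 * r)).map pvStepN := by
  induction r with
  | zero => simp
  | succ r ih =>
    rw [List.replicate_succ', List.flatten_append, ih]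
    have h3 : 3 * (r + 1) = 3 * r + 1 + 1 + 1 := by omega
    rw [h3, List.range_succ, List.range_succ, List.range_succ]
    have e0 : pvStepN (3 * r) = "GGgrrrGGgrrr" := by
      unfold pvStepN
      have : 3 * r % 3 = 0 := by omega
      simp [this]
    have e1 : pvStepN (3 * r + 1) = "yyyrrryyyrrr" := by
      unfold pvStepN
      have : (3 * r + 1) % 3 = 1 := by omega
      simp [this]
    have e2 : pvStepN (3 * r + 1 + 1) = "rrrGGgrrrGGg" := by
      unfold pvStepN
      have : (3 * r + 1 + 1) % 3 = 2 := by omega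
      simp [this]
    simp [e0, e1, e2]

theorem generate_phase_states_spec' (n : Int) :
    generate_phase_states n = generate_phase_states_alt n := by
  unfold generate_phase_states_alt
  rw [pv_A_eq_map]
  by_cases hn : 0 ≤ n
  · rw [PySem.List.slice_to _ hn, pv_flatten_replicate]
    rw [← List.map_take, List.take_range]
    have hfd : PySem.Int.floordiv n 3 = n / 3 := PySem.Int.floordiv_eq_ediv_of_pos (by omega)
    rw [hfd]
    have hm : min n.toNat (3 * (n / 3 + 1).toNat) = n.toNat := by omega
    rw [hm]
  · have h1 : n.toNat = 0 := by omega
    have h2 : (PySem.Int.floordiv n 3 + 1).toNat = 0 := by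
      have : PySem.Int.floordiv n 3 = n / 3 := PySem.Int.floordiv_eq_ediv_of_pos (by omega)
      rw [this]; omega
    rw [h1, h2]
    simp [PySem.List.slice]

-- ===== VERDICT (by name: the statement is the Claim_ definition above) =====
theorem generate_phase_states_spec : Claim_equal_generate_phase_states := by
  intro n _
  exact generate_phase_states_spec' n
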